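-- pv_equiv track=rewrite | github.com/phantypengy/sealsay | src/sealsay/cli.py | _parse_braced
-- ===== SOURCE A (Python) =====
-- def _parse_braced(mark: str) -> tuple[str, list[tuple[int, int]]]:
--     parts: list[str] = []
--     regions: list[tuple[int, int]] = []
--     pos = 0
--     i = 0
--
--     while i < len(mark):
--         if mark[i] == "{":
--             close = mark.find("}", i + 1)
--             if close < 0:
--                 parts.append(mark[i])
--                 pos += 1
--                 i += 1
--                 continue
--             region = mark[i + 1 : close]
--             parts.append(region)
--             regions.append((pos, len(region)))
--             pos += len(region)
--             i = close + 1
--         else: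
--             parts.append(mark[i])
--             pos += 1
--             i += 1
--
--     return "".join(parts), regions
-- ===== SOURCE B (Python) =====
-- def _parse_braced(mark: str) -> tuple[str, list[tuple[int, int]]]:
--     out: list[str] = []
--     regions: list[tuple[int, int]] = []
--     pos = 0
--     buf = None  # None = outside braces; list = chars collected since an unclosed "{"
--     for ch in mark:
--         if buf is None:
--             if ch == "{":
--                 buf = []
--             else:
--                 out.append(ch)
--                 pos += 1
--         elif ch == "}":
--             out.extend(buf)
--             regions.append((pos, len(buf)))
--             pos += len(buf)
--             buf = None
--         else:
--             buf.append(ch)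
--     if buf is not None:  # unmatched "{": everything after it is literal
--         out.append("{")
--         out.extend(buf)
--     return "".join(out), regions
-- ===== Notes on version B (the rewrite author's own statement) =====
-- stated objective: faster
-- what changed: Replaced the index-based scan that calls str.find on every '{' (rescanning the tail, O(n^2) worst case on unmatched braces) by a single-pass buffering state machine that reads each character exactly once.
import Mathlib
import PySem

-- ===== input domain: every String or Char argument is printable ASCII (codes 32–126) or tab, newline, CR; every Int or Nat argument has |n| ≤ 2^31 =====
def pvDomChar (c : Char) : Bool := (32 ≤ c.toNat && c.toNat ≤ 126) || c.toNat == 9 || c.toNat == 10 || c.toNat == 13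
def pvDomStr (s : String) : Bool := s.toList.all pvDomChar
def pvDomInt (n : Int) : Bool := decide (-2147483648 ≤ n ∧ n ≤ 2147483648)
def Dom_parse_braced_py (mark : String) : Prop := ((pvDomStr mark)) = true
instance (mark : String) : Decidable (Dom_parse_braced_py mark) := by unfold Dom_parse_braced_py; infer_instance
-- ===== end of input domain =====

-- B replaces A's repeated str.find scans by a single-pass buffering state machine; equal output everywhere.

-- ===== PORT A =====
-- A's while loop over index i is transcribed over the suffix mark.toList.drop i (one recursive call
-- per loop iteration, same state parts/regions/pos).  mark.find("}", i + 1) is the first-occurrence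
-- search in the suffix after the head, PySem.Chars.find rest ['}'] (exact: single-character needle,
-- index relative to rest); in the found branch close ≥ 0, so the Python slices mark[i+1:close] and
-- the jump i = close + 1 are exactly rest.take close.toNat and rest.drop (close.toNat + 1).
def parseALoop (cs : List Char) (pos : Int) (parts : List (List Char))
    (regions : List (Int × Int)) : List (List Char) × List (Int × Int) :=
  match cs with
  | [] => (parts, regions)
  | c :: rest =>
    if c = '{' then
      let close := PySem.Chars.find rest ['}']
      if close < 0 then
        parseALoop rest (pos + 1) (parts ++ [[c]]) regions
      else
        let region := rest.take close.toNat
        parseALoop (rest.drop (close.toNat + 1)) (pos + (region.length : Int))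
          (parts ++ [region]) (regions ++ [(pos, (region.length : Int))])
    else
      parseALoop rest (pos + 1) (parts ++ [[c]]) regions
termination_by cs.length
decreasing_by all_goals simp

-- "".join(parts) is parts.flatten on the character lists
def parse_braced_py (mark : String) : String × (List (Int × Int)) :=
  let r := parseALoop mark.toList 0 [] []
  (String.ofList r.1.flatten, r.2)

-- ===== PORT B =====
-- buf = none ↔ Python's buf is None; the trailing "if buf is not None" is the [] case with some b.
def parseBLoop (cs : List Char) (buf : Option (List Char)) (pos : Int) (out : List Char)
    (regions : List (Int × Int)) : List Char × List (Int × Int) :=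
  match cs with
  | [] =>
    match buf with
    | none => (out, regions)
    | some b => (out ++ '{' :: b, regions)
  | c :: rest =>
    match buf with
    | none =>
      if c = '{' then parseBLoop rest (some []) pos out regions
      else parseBLoop rest none (pos + 1) (out ++ [c]) regions
    | some b =>
      if c = '}' then
        parseBLoop rest none (pos + (b.length : Int)) (out ++ b)
          (regions ++ [(pos, (b.length : Int))])
      else parseBLoop rest (some (b ++ [c])) pos out regions

def parse_braced_py_alt (mark : String) : String × (List (Int × Int)) :=
  let r := parseBLoop mark.toList none 0 [] []
  (String.ofList r.1, r.2)

-- ===== PRECONDITION & SPEC =====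
def Spec_parse_braced_py (mark : String) (out : String × (List (Int × Int))) : Prop := out = parse_braced_py_alt mark
instance (mark : String) (out : String × (List (Int × Int))) : Decidable (Spec_parse_braced_py mark out) := by unfold Spec_parse_braced_py; infer_instance

-- ===== CLAIM (what is proved, stated in full; the proofs are below) =====
def Claim_equal_parse_braced_py : Prop := ∀ (mark : String), Dom_parse_braced_py mark → Spec_parse_braced_py mark (parse_braced_py mark)

-- ===== LEMMAS AND PROOFS =====

-- unfolding equations for the '{' head of A's loop
theorem aLoop_brace_nofind (rest : List Char) (pos : Int) (parts : List (List Char))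
    (regions : List (Int × Int)) (hfind : PySem.Chars.find rest ['}'] = -1) :
    parseALoop ('{' :: rest) pos parts regions =
      parseALoop rest (pos + 1) (parts ++ [['{']]) regions := by
  rw [parseALoop, if_pos rfl]
  simp only [hfind]
  norm_num

theorem aLoop_brace_found (rest : List Char) (pos : Int) (parts : List (List Char))
    (regions : List (Int × Int)) (hneg : ¬ PySem.Chars.find rest ['}'] < 0) :
    parseALoop ('{' :: rest) pos parts regions =
      parseALoop (rest.drop ((PySem.Chars.find rest ['}']).toNat + 1))
        (pos + ((rest.take (PySem.Chars.find rest ['}']).toNat).length : Int))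
        (parts ++ [rest.take (PySem.Chars.find rest ['}']).toNat])
        (regions ++ [(pos, ((rest.take (PySem.Chars.find rest ['}']).toNat).length : Int))]) := by
  rw [parseALoop, if_pos rfl]
  simp only [if_neg hneg]

theorem aLoop_nonbrace (c : Char) (rest : List Char) (pos : Int) (parts : List (List Char))
    (regions : List (Int × Int)) (hc : c ≠ '{') :
    parseALoop (c :: rest) pos parts regions =
      parseALoop rest (pos + 1) (parts ++ [[c]]) regions := by
  rw [parseALoop, if_neg hc]

-- Once B is buffering and no '}' remains, it swallows the rest into the buffer and flushes it literally.
theorem bLoop_no_close (rest : List Char) (hrest : '}' ∉ rest) :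
    ∀ (b : List Char) (pos : Int) (out : List Char) (regions : List (Int × Int)),
      parseBLoop rest (some b) pos out regions = (out ++ '{' :: (b ++ rest), regions) := by
  induction rest with
  | nil => intro b pos out regions; simp [parseBLoop]
  | cons c rest ih =>
    intro b pos out regions
    have hc : c ≠ '}' := fun h => hrest (h ▸ List.mem_cons_self)
    have hrest' : '}' ∉ rest := fun h => hrest (List.mem_cons_of_mem _ h)
    rw [parseBLoop, if_neg hc, ih hrest']
    simp

-- On a '}'-free list A emits every character literally.
theorem aLoop_no_close (cs : List Char) (hcs : '}' ∉ cs) :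
    ∀ (pos : Int) (parts : List (List Char)) (regions : List (Int × Int)),
      parseALoop cs pos parts regions = (parts ++ cs.map (fun c => [c]), regions) := by
  induction cs with
  | nil => intro pos parts regions; simp [parseALoop]
  | cons c rest ih =>
    intro pos parts regions
    have hrest : '}' ∉ rest := fun h => hcs (List.mem_cons_of_mem _ h)
    by_cases hc : c = '{'
    · subst hc
      have hfind : PySem.Chars.find rest ['}'] = -1 := by
        rw [PySem.Chars.find_eq_neg_one_iff, List.singleton_infix_iff]
        exact hrest
      rw [aLoop_brace_nofind rest pos parts regions hfind, ih hrest]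
      simp
    · rw [aLoop_nonbrace c rest pos parts regions hc, ih hrest]
      simp

-- While buffering, B consumes the region up to the matching '}' and flushes it as one piece.
theorem bLoop_region (region : List Char) (hreg : '}' ∉ region) :
    ∀ (b : List Char) (pos : Int) (out : List Char) (regions : List (Int × Int)) (rest' : List Char),
      parseBLoop (region ++ '}' :: rest') (some b) pos out regions =
        parseBLoop rest' none (pos + ((b ++ region).length : Int)) (out ++ (b ++ region))
          (regions ++ [(pos, ((b ++ region).length : Int))]) := by
  induction region with
  | nil => intro b pos out regions rest'; simp [parseBLoop]
  | cons c region ih =>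
    intro b pos out regions rest'
    have hc : c ≠ '}' := fun h => hreg (h ▸ List.mem_cons_self)
    have hreg' : '}' ∉ region := fun h => hreg (List.mem_cons_of_mem _ h)
    have hlist : b ++ c :: region = (b ++ [c]) ++ region := by simp
    rw [List.cons_append, parseBLoop, if_neg hc, ih hreg', hlist]

-- singleton parts flatten back to the characters
theorem flatten_map_singleton (cs : List Char) : (cs.map (fun c => [c])).flatten = cs := by
  induction cs with
  | nil => rfl
  | cons c t ih => simp [ih]

-- Main invariant: A's loop (joined) equals B's loop started outside a brace.
theorem loop_agree : ∀ (n : Nat) (cs : List Char), cs.length ≤ n →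
    ∀ (pos : Int) (parts : List (List Char)) (regions : List (Int × Int)),
      ((parseALoop cs pos parts regions).1.flatten, (parseALoop cs pos parts regions).2) =
        parseBLoop cs none pos parts.flatten regions := by
  intro n
  induction n with
  | zero =>
    intro cs hcs pos parts regions
    have : cs = [] := List.length_eq_zero_iff.mp (Nat.le_zero.mp hcs)
    subst this; simp [parseALoop, parseBLoop]
  | succ n ih =>
    intro cs hcs pos parts regions
    match cs with
    | [] => simp [parseALoop, parseBLoop]
    | c :: rest =>
      have hlen : rest.length ≤ n := by simpa using hcs
      by_cases hc : c = '{'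
      · subst hc
        by_cases hneg : PySem.Chars.find rest ['}'] < 0
        · -- no closing brace: everything from here on is literal
          have hfind : PySem.Chars.find rest ['}'] = -1 := by
            have := PySem.Chars.neg_one_le_find rest ['}']
            omega
          have hrest : '}' ∉ rest := by
            have := (PySem.Chars.find_eq_neg_one_iff rest ['}']).mp hfind
            rwa [List.singleton_infix_iff] at this
          rw [aLoop_brace_nofind rest pos parts regions hfind,
            aLoop_no_close rest hrest, parseBLoop, if_pos rfl, bLoop_no_close rest hrest]
          simp [flatten_map_singleton]
        · -- a closing brace exists: split rest = region ++ '}' :: rest'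
          have h0 : (0 : Int) ≤ PySem.Chars.find rest ['}'] := by omega
          obtain ⟨hpre, hmin⟩ := PySem.Chars.find_spec (s := rest) (sub := ['}'])
            (by omega : 0 ≤ PySem.Chars.find rest ['}'])
          set k : Nat := (PySem.Chars.find rest ['}']).toNat with hk
          obtain ⟨t, ht⟩ := hpre
          have hdropk : rest.drop k = '}' :: t := by simpa using ht.symm
          have hsplit : rest = rest.take k ++ '}' :: t := by
            conv_lhs => rw [← List.take_append_drop k rest]
            rw [hdropk]
          have hklt : k < rest.length := by
            by_contra h
            have hnil : rest.drop k = [] := List.drop_eq_nil_of_le (Nat.le_of_not_lt h)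
            rw [hdropk] at hnil; exact List.cons_ne_nil _ _ hnil
          have htake : rest.drop (k + 1) = t := by
            have h1 : rest.drop (k + 1) = (rest.drop k).drop 1 := by
              rw [List.drop_drop]
            rw [h1, hdropk]; rfl
          have hreg : '}' ∉ rest.take k := by
            intro hmem
            obtain ⟨i, hi, hgi⟩ := List.mem_iff_getElem.mp hmem
            have hik : i < k := by
              simp [List.length_take] at hi
              omega
            have hilen : i < rest.length := lt_trans hik hklt
            refine hmin i hik ?_
            rw [List.drop_eq_getElem_cons hilen]
            have hgi' : rest[i] = '}' := by
              rw [← List.getElem_take (h := hi)]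
              exact hgi
            rw [hgi']
            exact ⟨rest.drop (i + 1), rfl⟩
          have hlen' : (rest.drop (k + 1)).length ≤ n := by
            simp [List.length_drop]
            omega
          rw [aLoop_brace_found rest pos parts regions hneg, ← hk,
            ih _ hlen', parseBLoop, if_pos rfl]
          conv_rhs => rw [hsplit]
          rw [bLoop_region (rest.take k) hreg, htake]
          simp
      · rw [aLoop_nonbrace c rest pos parts regions hc, ih rest hlen,
          parseBLoop, if_neg hc]
        simp

-- ===== VERDICT (by name: the statement is the Claim_ definition above) =====
theorem parse_braced_py_spec : Claim_equal_parse_braced_py := by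
  intro mark _
  unfold Spec_parse_braced_py parse_braced_py parse_braced_py_alt
  have h := loop_agree mark.toList.length mark.toList le_rfl 0 [] []
  simp only [List.flatten_nil] at h
  rw [← h]
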